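-- pv_equiv track=rewrite | github.com/EduardFrlicka/VUT-FIT-BIT | IAM/SAT/8_Queens_Problem/queens.py | bishop_clausules_count
-- ===== SOURCE A (Python) =====
-- def bishop_clausules_count(N:int):
--     A, B = N-1, N-1
--     sum = 0
--     while A >= 0:
--         if(A == 0):
--             sum+=int(B/2)
--             break
--         sum+=A*B*2
--         A-=2
--         B+=2
--     return sum
-- ===== SOURCE B (Python) =====
-- def bishop_clausules_count(N: int):
--     # Closed form: sum of the arithmetic-like series equals N*(N-1)*(2N-1)/3.
--     if N <= 0:
--         return 0
--     return N * (N - 1) * (2 * N - 1) // 3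
-- ===== Notes on version B (the rewrite author's own statement) =====
-- stated objective: faster
-- what changed: Replaced the linear-time while-loop accumulation by a closed-form cubic polynomial evaluated in constant time (zero for non-positive board sizes).
import Mathlib
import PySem

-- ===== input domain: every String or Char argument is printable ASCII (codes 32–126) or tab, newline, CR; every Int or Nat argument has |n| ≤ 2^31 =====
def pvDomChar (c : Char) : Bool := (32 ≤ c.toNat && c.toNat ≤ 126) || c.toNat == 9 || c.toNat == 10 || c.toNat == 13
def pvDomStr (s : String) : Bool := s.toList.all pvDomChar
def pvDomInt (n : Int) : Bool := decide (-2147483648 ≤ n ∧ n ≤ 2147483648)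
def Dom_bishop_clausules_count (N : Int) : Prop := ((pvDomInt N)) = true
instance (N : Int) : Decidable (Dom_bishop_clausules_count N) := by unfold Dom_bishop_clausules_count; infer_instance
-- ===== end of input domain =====

-- B replaces A's O(N) while-loop accumulation with the closed form N(N-1)(2N-1)/3 (objective: faster, asymptotic).

-- ===== PORT A =====
-- the while loop of A; int(B/2) is truncating division (exact on Dom, where B fits a double)
def bishopLoopA (A B sum : Int) : Int :=
  if _h : A ≥ 0 then
    if A = 0 then sum + Int.tdiv B 2
    else bishopLoopA (A - 2) (B + 2) (sum + A * B * 2)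
  else sum
termination_by A.toNat
decreasing_by omega

def bishop_clausules_count (N : Int) : Int :=
  bishopLoopA (N - 1) (N - 1) 0

-- ===== PORT B =====
def bishop_clausules_count_alt (N : Int) : Int :=
  if N ≤ 0 then 0
  else PySem.Int.floordiv (N * (N - 1) * (2 * N - 1)) 3

-- ===== PRECONDITION & SPEC =====
def Spec_bishop_clausules_count (N : Int) (out : Int) : Prop := out = bishop_clausules_count_alt N
instance (N : Int) (out : Int) : Decidable (Spec_bishop_clausules_count N out) := by unfold Spec_bishop_clausules_count; infer_instance

-- ===== CLAIM (what is proved, stated in full; the proofs are below) =====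
def Claim_equal_bishop_clausules_count : Prop := ∀ (N : Int), Dom_bishop_clausules_count N → Spec_bishop_clausules_count N (bishop_clausules_count N)

-- ===== LEMMAS AND PROOFS =====

-- Loop invariant: for A ≥ -1 with A and B of the same parity,
-- 6 · bishopLoopA A B sum = 6·sum + A³ + 3A²B + 6AB - A + 3B.
theorem bishopLoopA_closed (A B sum : Int) (hA : A ≥ -1) (hp : (A + B) % 2 = 0) :
    6 * bishopLoopA A B sum = 6 * sum + A ^ 3 + 3 * A ^ 2 * B + 6 * A * B - A + 3 * B := by
  by_cases h0 : A ≥ 0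
  · by_cases hz : A = 0
    · subst hz
      rw [bishopLoopA]
      obtain ⟨k, hk⟩ : ∃ k, B = 2 * k := ⟨B / 2, by omega⟩
      subst hk
      simp [Int.mul_tdiv_cancel_left _ (by norm_num : (2:Int) ≠ 0)]
      ring
    · have h1 : A ≥ 1 := by omega
      rw [bishopLoopA]
      simp only [ge_iff_le, h0, dite_true, if_neg hz]
      have ih := bishopLoopA_closed (A - 2) (B + 2) (sum + A * B * 2)
        (by omega) (by omega)
      rw [ih]
      ring
  · have hm1 : A = -1 := by omega
    subst hm1
    rw [bishopLoopA]
    simp only [ge_iff_le]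
    norm_num
    ring
termination_by A.toNat
decreasing_by omega

theorem three_dvd_poly (N : Int) : (3 : Int) ∣ N * (N - 1) * (2 * N - 1) := by
  obtain ⟨q, hq⟩ : ∃ q : Int, N = 3 * q + N % 3 := ⟨N / 3, by omega⟩
  have h : N % 3 = 0 ∨ N % 3 = 1 ∨ N % 3 = 2 := by omega
  rcases h with h | h | h <;> rw [hq, h]
  · exact ⟨q * (3 * q - 1) * (6 * q - 1), by ring⟩
  · exact ⟨(3 * q + 1) * q * (6 * q + 1), by ring⟩
  · exact ⟨(3 * q + 2) * (3 * q + 1) * (2 * q + 1), by ring⟩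

-- ===== VERDICT (by name: the statement is the Claim_ definition above) =====
theorem bishop_clausules_count_spec : Claim_equal_bishop_clausules_count := by
  intro N _
  unfold Spec_bishop_clausules_count bishop_clausules_count bishop_clausules_count_alt
  by_cases hN : N ≤ 0
  · rw [if_pos hN, bishopLoopA]
    simp only [ge_iff_le]
    rw [dif_neg (by omega)]
  · rw [if_neg hN]
    have key := bishopLoopA_closed (N - 1) (N - 1) 0 (by omega) (by omega)
    obtain ⟨k, hk⟩ := three_dvd_poly N
    rw [hk]
    unfold PySem.Int.floordiv
    rw [Int.mul_fdiv_cancel_left _ (by norm_num)]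
    have h6 : 6 * bishopLoopA (N - 1) (N - 1) 0 = 6 * k := by linear_combination key + 2 * hk
    omega
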